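-- pv_equiv track=rewrite | github.com/kylebegovich/ProjectEuler | Python/Progress/Problem117.py | num_tiles
-- ===== SOURCE A (Python) =====
-- memo_tiles = {0: 1, 1: 1, 2: 2, 3: 4}
--
-- def num_tiles(num_squares):
--     if num_squares in memo_tiles:
--         return memo_tiles[num_squares]
--
--     use_none = num_tiles(num_squares - 1)
--     use_red = num_tiles(num_squares - 2)
--     use_green = num_tiles(num_squares - 3)
--     use_blue = num_tiles(num_squares - 4)
--
--     to_ret = use_none + use_red + use_green + use_blue
--     memo_tiles[num_squares] = to_ret
--     return to_ret
-- ===== SOURCE B (Python) =====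
-- def num_tiles(num_squares):
--     base = (1, 1, 2, 4)
--     if num_squares < 4:
--         return base[num_squares]
--     a, b, c, d = base
--     for _ in range(4, num_squares + 1):
--         a, b, c, d = b, c, d, a + b + c + d
--     return d
-- ===== Notes on version B (the rewrite author's own statement) =====
-- stated objective: faster
-- what changed: replaced the memoized 4-way recursive tree with an iterative bottom-up pass keeping a rolling window of the last four values
import Mathlib
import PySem

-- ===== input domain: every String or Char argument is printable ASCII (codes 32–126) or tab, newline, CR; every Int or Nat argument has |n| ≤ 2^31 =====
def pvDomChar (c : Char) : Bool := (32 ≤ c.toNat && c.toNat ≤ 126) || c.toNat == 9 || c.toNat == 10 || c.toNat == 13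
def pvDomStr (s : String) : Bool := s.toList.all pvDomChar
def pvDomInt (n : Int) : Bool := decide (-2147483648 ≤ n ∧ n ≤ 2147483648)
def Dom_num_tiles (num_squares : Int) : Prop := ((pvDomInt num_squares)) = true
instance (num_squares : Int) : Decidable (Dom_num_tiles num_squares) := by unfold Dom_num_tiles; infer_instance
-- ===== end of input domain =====

-- B replaces A's memoized recursion by a bottom-up loop with a rolling window of the last four values (constant memory, no recursion).
-- Equivalence is about the RETURN value only: A additionally mutates the module-level memo dict.

-- ===== PORT A =====
-- A's memoized recursion: the memo dict is threaded through the recursive calls (Python mutates the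
-- module-level dict; a fresh copy per top-level call returns the same values). fuel = num_squares+1
-- bounds the recursion depth (each call recurses on strictly smaller arguments down to the memo base);
-- it suffices for every admitted input, and fuel exhaustion (Python: unbounded recursion on negative
-- input, RecursionError) yields the 'none' branch, excluded by Pre_.
def pvGoA (fuel : Nat) (n : Int) (memo : PySem.Dict Int Int) : Option (Int × PySem.Dict Int Int) :=
  match fuel with
  | 0 => none
  | f+1 =>
    match memo.get? n with
    | some v => some (v, memo)
    | none =>
      match pvGoA f (n-1) memo with
      | none => none
      | some (use_none, m1) =>
        match pvGoA f (n-2) m1 with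
        | none => none
        | some (use_red, m2) =>
          match pvGoA f (n-3) m2 with
          | none => none
          | some (use_green, m3) =>
            match pvGoA f (n-4) m3 with
            | none => none
            | some (use_blue, m4) =>
              let to_ret := use_none + use_red + use_green + use_blue
              some (to_ret, m4.insert n to_ret)

def num_tiles (num_squares : Int) : Int :=
  match pvGoA (num_squares.toNat + 1) num_squares
      (PySem.Dict.ofList [(0, 1), (1, 1), (2, 2), (3, 4)]) with
  | some (v, _) => v
  | none => 0

-- ===== PORT B =====
def pvStep (s : Int × Int × Int × Int) : Int × Int × Int × Int :=
  (s.2.1, s.2.2.1, s.2.2.2, s.1 + s.2.1 + s.2.2.1 + s.2.2.2)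

def num_tiles_alt (num_squares : Int) : Int :=
  if num_squares < 4 then
    (PySem.List.pyGet? ([1, 1, 2, 4] : List Int) num_squares).getD 0
  else
    ((PySem.List.pyRange 4 (num_squares + 1) 1).foldl (fun s _ => pvStep s) (1, 1, 2, 4)).2.2.2

-- ===== PRECONDITION & SPEC =====
-- Pre_: A recurses without bound (RecursionError) on negative inputs, so only 0 <= num_squares is admitted.
def Pre_num_tiles (num_squares : Int) : Prop := 0 ≤ num_squares
instance (num_squares : Int) : Decidable (Pre_num_tiles num_squares) := by unfold Pre_num_tiles; infer_instance
def pvWitness_num_tiles : Int := (5)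

def Spec_num_tiles (num_squares : Int) (out : Int) : Prop := out = num_tiles_alt num_squares
instance (num_squares : Int) (out : Int) : Decidable (Spec_num_tiles num_squares out) := by unfold Spec_num_tiles; infer_instance

-- ===== CLAIM (what is proved, stated in full; the proofs are below) =====
def Claim_equal_num_tiles : Prop := ∀ (num_squares : Int), Dom_num_tiles num_squares → Pre_num_tiles num_squares → Spec_num_tiles num_squares (num_tiles num_squares)

-- ===== LEMMAS AND PROOFS =====

-- Proof-side specification: the tetranacci sequence both ports compute.
def pvT : Nat → Int
  | 0 => 1
  | 1 => 1
  | 2 => 2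
  | 3 => 4
  | n+4 => pvT (n+3) + pvT (n+2) + pvT (n+1) + pvT n

-- Every memo entry is a correct value of pvT at a non-negative key.
def pvInv (m : PySem.Dict Int Int) : Prop :=
  ∀ k v, m.get? k = some v → 0 ≤ k ∧ v = pvT k.toNat

-- The four base entries are present.
def pvBase (m : PySem.Dict Int Int) : Prop :=
  m.get? 0 = some 1 ∧ m.get? 1 = some 1 ∧ m.get? 2 = some 2 ∧ m.get? 3 = some 4

theorem pvGoA_ok : ∀ (fuel : Nat) (n : Int) (m : PySem.Dict Int Int),
    pvInv m → pvBase m → 0 ≤ n → n.toNat < fuel →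
    ∃ m', pvGoA fuel n m = some (pvT n.toNat, m') ∧ pvInv m' ∧ pvBase m' := by
  intro fuel
  induction fuel with
  | zero => intro n m _ _ _ hf; omega
  | succ f ih =>
    intro n m hinv hbase hn hf
    cases hget : m.get? n with
    | some v =>
      obtain ⟨_, hv⟩ := hinv n v hget
      exact ⟨m, by simp [pvGoA, hget, hv], hinv, hbase⟩
    | none =>
      have h4 : 4 ≤ n := by
        by_contra hlt
        interval_cases n <;> simp_all [pvBase]
      obtain ⟨k, hk⟩ : ∃ k : Nat, n = (k : Int) + 4 := ⟨(n - 4).toNat, by omega⟩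
      obtain ⟨m1, e1, i1, b1⟩ := ih (n-1) m hinv hbase (by omega) (by omega)
      obtain ⟨m2, e2, i2, b2⟩ := ih (n-2) m1 i1 b1 (by omega) (by omega)
      obtain ⟨m3, e3, i3, b3⟩ := ih (n-3) m2 i2 b2 (by omega) (by omega)
      obtain ⟨m4, e4, i4, b4⟩ := ih (n-4) m3 i3 b3 (by omega) (by omega)
      have hsum : pvT (n-1).toNat + pvT (n-2).toNat + pvT (n-3).toNat + pvT (n-4).toNat
          = pvT n.toNat := by
        have h1 : (n-1).toNat = k+3 := by omega
        have h2 : (n-2).toNat = k+2 := by omega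
        have h3 : (n-3).toNat = k+1 := by omega
        have h4' : (n-4).toNat = k := by omega
        have h0 : n.toNat = k+4 := by omega
        rw [h1, h2, h3, h4', h0, pvT]
      refine ⟨m4.insert n (pvT n.toNat), ?_, ?_, ?_⟩
      · simp only [pvGoA, hget, e1, e2, e3, e4]
        rw [hsum]
      · intro k' v' hk'
        rw [PySem.Dict.get?_insert] at hk'
        by_cases hc : k' = n
        · subst hc
          rw [if_pos rfl, Option.some_inj] at hk'
          exact ⟨by omega, hk'.symm⟩
        · rw [if_neg hc] at hk'
          exact i4 k' v' hk'
      · obtain ⟨p0, p1, p2, p3⟩ := b4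
        refine ⟨?_, ?_, ?_, ?_⟩
        · rw [PySem.Dict.get?_insert, if_neg (show (0:Int) ≠ n by omega)]; exact p0
        · rw [PySem.Dict.get?_insert, if_neg (show (1:Int) ≠ n by omega)]; exact p1
        · rw [PySem.Dict.get?_insert, if_neg (show (2:Int) ≠ n by omega)]; exact p2
        · rw [PySem.Dict.get?_insert, if_neg (show (3:Int) ≠ n by omega)]; exact p3

-- The initial literal memo satisfies the invariants.
theorem pvInv_init : pvInv (PySem.Dict.ofList [(0, 1), (1, 1), (2, 2), (3, 4)]) := by
  intro k v h
  have e : PySem.Dict.ofList [((0:Int),(1:Int)),(1,1),(2,2),(3,4)]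
      = PySem.Dict.mk [(0,1),(1,1),(2,2),(3,4)] := by decide
  rw [e] at h
  simp only [PySem.Dict.get?_mk_cons] at h
  split_ifs at h with h0 h1 h2 h3
  · obtain rfl := eq_of_beq h0
    rw [Option.some_inj] at h
    exact ⟨by norm_num, by rw [← h]; rfl⟩
  · obtain rfl := eq_of_beq h1
    rw [Option.some_inj] at h
    exact ⟨by norm_num, by rw [← h]; rfl⟩
  · obtain rfl := eq_of_beq h2
    rw [Option.some_inj] at h
    exact ⟨by norm_num, by rw [← h]; rfl⟩
  · obtain rfl := eq_of_beq h3
    rw [Option.some_inj] at h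
    exact ⟨by norm_num, by rw [← h]; rfl⟩
  · exact absurd h (by simp [PySem.Dict.get?])

theorem pvBase_init : pvBase (PySem.Dict.ofList [(0, 1), (1, 1), (2, 2), (3, 4)]) := by
  refine ⟨?_, ?_, ?_, ?_⟩ <;> decide

-- Loop invariant for B: after processing range(4, m+5) the rolling window holds pvT(m+1..m+4).
theorem pvFold_inv (m : Nat) :
    (PySem.List.pyRange 4 ((m : Int) + 4 + 1) 1).foldl (fun s _ => pvStep s) (1, 1, 2, 4)
      = (pvT (m+1), pvT (m+2), pvT (m+3), pvT (m+4)) := by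
  induction m with
  | zero => decide
  | succ k ih =>
      have h : (4 : Int) ≤ (k : Int) + 4 + 1 := by omega
      have hr : PySem.List.pyRange 4 ((↑(k+1) : Int) + 4 + 1) 1
          = PySem.List.pyRange 4 ((k : Int) + 4 + 1) 1 ++ [(k : Int) + 4 + 1] := by
        have := PySem.List.pyRange_one_succ_right (a := 4) (b := (k : Int) + 4 + 1) h
        push_cast
        push_cast at this
        convert this using 3
      rw [hr, List.foldl_append, ih]
      have hsum : pvT (k+1) + pvT (k+2) + pvT (k+3) + pvT (k+4) = pvT (k+5) := by
        show _ = pvT ((k+1)+4)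
        conv_rhs => rw [pvT]
        ring
      simp only [List.foldl, pvStep, hsum,
        show k+1+1 = k+2 by omega, show k+1+2 = k+3 by omega,
        show k+1+3 = k+4 by omega, show k+1+4 = k+5 by omega]

theorem pvAlt_eq (n : Int) (hn : 0 ≤ n) : num_tiles_alt n = pvT n.toNat := by
  unfold num_tiles_alt
  obtain ⟨m, rfl⟩ : ∃ m : Nat, n = (m : Int) := ⟨n.toNat, (Int.toNat_of_nonneg hn).symm⟩
  by_cases h4 : (m : Int) < 4
  · have hm : m < 4 := by exact_mod_cast h4
    interval_cases m <;> decide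
  · rw [if_neg h4]
    obtain ⟨k, rfl⟩ : ∃ k : Nat, m = k + 4 := ⟨m - 4, by omega⟩
    have hfold := pvFold_inv k
    push_cast
    push_cast at hfold
    rw [hfold]
    have : ((k : Int) + 4).toNat = k + 4 := by omega
    rw [this]

-- ===== VERDICT (by name: the statement is the Claim_ definition above) =====
theorem num_tiles_spec : Claim_equal_num_tiles := by
  intro n _ hpre
  unfold Spec_num_tiles
  obtain ⟨m', hrun, -, -⟩ :=
    pvGoA_ok (n.toNat + 1) n (PySem.Dict.ofList [(0, 1), (1, 1), (2, 2), (3, 4)])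
      pvInv_init pvBase_init hpre (by omega)
  unfold num_tiles
  rw [hrun, pvAlt_eq n hpre]
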